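-- pv_equiv track=rewrite | github.com/noonanhe/Undergraduate-Research | Bipartition Analysis Project/calBranchFrequency.py | removeBranchLen
-- ===== SOURCE A (Python) =====
-- def removeBranchLen(tree):
--     numList = ["0", "1", "2", "3", "4", "5", "6", "7", "8", "9", ".", ":"]
--     flag = 0
--     temtree = ""
--     for i in tree.strip():
--         if i == ":":
--             flag = 1
--         if (flag == 1) and (i not in numList):
--             flag = 0
--         if flag == 0:
--             temtree += i
--     return temtree
-- ===== SOURCE B (Python) =====
-- def removeBranchLen(tree):
--     chunks = tree.strip().split(":")
--     return chunks[0] + "".join(c.lstrip("0123456789.") for c in chunks[1:])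
-- ===== Notes on version B (the rewrite author's own statement) =====
-- stated objective: simpler
-- what changed: Replaced the stateful char-by-char flag loop by a two-liner: split the stripped string on the colon separator and strip the leading digit/dot run of each chunk after the first (each separator restarts the skip, so splitting reproduces the loop exactly).
import Mathlib
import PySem

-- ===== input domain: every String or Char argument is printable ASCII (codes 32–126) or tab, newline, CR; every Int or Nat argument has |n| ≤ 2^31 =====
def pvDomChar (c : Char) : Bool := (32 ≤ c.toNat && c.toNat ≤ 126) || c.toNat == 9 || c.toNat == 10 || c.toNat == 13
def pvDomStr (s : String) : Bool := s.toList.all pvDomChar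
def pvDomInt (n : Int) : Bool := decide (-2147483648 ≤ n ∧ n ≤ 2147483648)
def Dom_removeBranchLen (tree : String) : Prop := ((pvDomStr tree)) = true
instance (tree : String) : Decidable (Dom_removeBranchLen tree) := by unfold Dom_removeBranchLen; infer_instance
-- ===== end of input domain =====

-- B replaces A's char-by-char flag loop by split-on-':' plus stripping the leading [0-9.] run
-- of each later chunk (objective: simpler; measurably faster by a constant factor — bulk
-- split/lstrip instead of a per-char Python loop).

-- ===== PORT A =====
-- numList is a Python list of 1-char strings; membership of the loop char is ported over Char.
def numList : List Char := ['0','1','2','3','4','5','6','7','8','9','.',':']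

def stepA (st : Int × List Char) (i : Char) : Int × List Char :=
  let flag : Int := if i = ':' then 1 else st.1
  let flag : Int := if flag = 1 ∧ i ∉ numList then 0 else flag
  let temtree : List Char := if flag = 0 then st.2 ++ [i] else st.2
  (flag, temtree)

def removeBranchLen (tree : String) : String :=
  String.mk (((PySem.Str.strip tree).toList.foldl stepA (0, [])).2)

-- ===== PORT B =====
def bStripSet : List Char := ['0','1','2','3','4','5','6','7','8','9','.']

-- .split(":") → PySem.Chars.splitOn (never returns []; the [] arm is unreachable);
-- c.lstrip("0123456789.") → dropWhile over that char set (exact); "".join → flatten (exact).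
def removeBranchLen_alt (tree : String) : String :=
  match PySem.Chars.splitOn (PySem.Str.strip tree).toList [':'] with
  | [] => ""
  | c0 :: rest => String.mk (c0 ++ (rest.map (fun c => c.dropWhile (· ∈ bStripSet))).flatten)

-- ===== PRECONDITION & SPEC =====
def Spec_removeBranchLen (tree : String) (out : String) : Prop := out = removeBranchLen_alt tree
instance (tree : String) (out : String) : Decidable (Spec_removeBranchLen tree out) := by unfold Spec_removeBranchLen; infer_instance

-- ===== CLAIM (what is proved, stated in full; the proofs are below) =====
def Claim_equal_removeBranchLen : Prop := ∀ (tree : String), Dom_removeBranchLen tree → Spec_removeBranchLen tree (removeBranchLen tree)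

-- ===== LEMMAS AND PROOFS =====

-- spec of Python's split(":"): structural recursion on the char list
def sc : List Char → List (List Char)
  | [] => [[]]
  | c :: rest =>
    if c = ':' then [] :: sc rest
    else match sc rest with
      | [] => [[c]]
      | p :: ps => (c :: p) :: ps

def fB (cs : List Char) : List Char := cs.dropWhile (· ∈ bStripSet)

lemma modifyHead_id' (l : List (List Char)) : l.modifyHead (fun x => x) = l := by
  cases l <;> rfl

-- what A's loop produces starting with flag 0 / flag 1
def hA (l : List Char) : List Char :=
  match sc l with
  | [] => []
  | c0 :: rest => c0 ++ (rest.map fB).flatten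

def kA (l : List Char) : List Char := ((sc l).map fB).flatten

lemma sc_ne_nil : ∀ l, sc l ≠ [] := by
  intro l
  cases l with
  | nil => simp [sc]
  | cons c rest =>
    simp only [sc]
    split
    · simp
    · split <;> simp_all

lemma go_eq : ∀ (fuel : Nat) (l cur acc : _), l.length < fuel →
    PySem.Chars.splitOn.go [':'] fuel l cur acc
      = acc.reverse ++ (sc l).modifyHead (cur.reverse ++ ·) := by
  intro fuel
  induction fuel with
  | zero => intro l cur acc h; omega
  | succ fuel ih =>
    intro l cur acc h
    cases l with
    | nil => simp [PySem.Chars.splitOn.go, sc]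
    | cons c rest =>
      by_cases hc : c = ':'
      · subst hc
        rw [PySem.Chars.splitOn.go]
        simp only [List.isPrefixOf, List.length]
        rw [if_pos (by simp)]
        rw [ih _ _ _ (by simp at h ⊢; omega)]
        simp [sc, modifyHead_id']
      · rw [PySem.Chars.splitOn.go]
        rw [if_neg (by simp [List.isPrefixOf]; exact fun h => hc h.symm)]
        rw [ih _ _ _ (by simp at h ⊢; omega)]
        simp only [sc, if_neg hc]
        
        cases hsc : sc rest with
        | nil => exact absurd hsc (sc_ne_nil rest)
        | cons p ps => simp

lemma splitOn_eq (l : List Char) : PySem.Chars.splitOn l [':'] = sc l := by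
  unfold PySem.Chars.splitOn
  rw [go_eq _ _ _ _ (by omega)]
  simp [modifyHead_id']

lemma mem_numList (c : Char) : c ∈ numList ↔ c = ':' ∨ c ∈ bStripSet := by
  simp [numList, bStripSet]; tauto

-- the loop invariant: A's fold from flag 0 builds hA, from flag 1 builds kA
lemma fold_eq : ∀ (l : List Char) (acc : List Char),
    (l.foldl stepA (0, acc)).2 = acc ++ hA l ∧ (l.foldl stepA (1, acc)).2 = acc ++ kA l := by
  intro l
  induction l with
  | nil => intro acc; simp [hA, kA, sc, fB]
  | cons c rest ih =>
    intro acc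
    by_cases hc : c = ':'
    · subst hc
      have hstep0 : stepA (0, acc) ':' = (1, acc) := by simp [stepA, numList]
      have hstep1 : stepA (1, acc) ':' = (1, acc) := by simp [stepA, numList]
      constructor
      · rw [List.foldl_cons, hstep0]
        rw [(ih acc).2]
        simp [hA, kA, sc]
      · rw [List.foldl_cons, hstep1]
        rw [(ih acc).2]
        simp [kA, sc, fB]
    · by_cases hn : c ∈ bStripSet
      · have hmem : c ∈ numList := (mem_numList c).mpr (Or.inr hn)
        have hstep0 : stepA (0, acc) c = (0, acc ++ [c]) := by
          simp [stepA, hc]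
        have hstep1 : stepA (1, acc) c = (1, acc) := by
          simp [stepA, hc, hmem]
        cases hsc : sc rest with
        | nil => exact absurd hsc (sc_ne_nil rest)
        | cons p ps =>
          constructor
          · rw [List.foldl_cons, hstep0, (ih (acc ++ [c])).1]
            simp [hA, sc, hc, hsc]
          · rw [List.foldl_cons, hstep1, (ih acc).2]
            simp [kA, sc, hc, hsc, fB, hn]
      · have hmem : c ∉ numList := by
          rw [mem_numList]; push_neg; exact ⟨hc, hn⟩
        have hstep0 : stepA (0, acc) c = (0, acc ++ [c]) := by
          simp [stepA, hc]
        have hstep1 : stepA (1, acc) c = (0, acc ++ [c]) := by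
          simp [stepA, hc, hmem]
        cases hsc : sc rest with
        | nil => exact absurd hsc (sc_ne_nil rest)
        | cons p ps =>
          constructor
          · rw [List.foldl_cons, hstep0, (ih (acc ++ [c])).1]
            simp [hA, sc, hc, hsc]
          · rw [List.foldl_cons, hstep1, (ih (acc ++ [c])).1]
            simp [hA, kA, sc, hc, hsc, fB, hn]

-- ===== VERDICT (by name: the statement is the Claim_ definition above) =====
theorem removeBranchLen_spec : Claim_equal_removeBranchLen := by
  intro tree _
  unfold Spec_removeBranchLen removeBranchLen removeBranchLen_alt
  simp only [PySem.Str.toList_strip]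
  rw [splitOn_eq]
  rw [(fold_eq (PySem.Chars.strip tree.toList) []).1]
  cases hsc : sc (PySem.Chars.strip tree.toList) with
  | nil => exact absurd hsc (sc_ne_nil _)
  | cons c0 ps => simp [hA, hsc]; rfl
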